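-- pv_equiv track=rewrite | github.com/dyd2564/Algorithm | 프로그래머스/unrated/181931. 등차수열의 특정한 항만 더하기/등차수열의 특정한 항만 더하기.py | solution
-- ===== SOURCE A (Python) =====
-- def solution(a, d, included):
--     answer = 0
--     while included:
--         if included[0] == True:
--             answer += a
--         a += d
--         included.pop(0)
--     return answer
-- ===== SOURCE B (Python) =====
-- def solution(a, d, included):
--     return sum(a + i * d for i, flag in enumerate(included) if flag)
-- ===== Notes on version B (the rewrite author's own statement) =====
-- stated objective: faster
-- what changed: Replace the destructive while-loop with repeated pop(0) (quadratic list shifting, mutates the argument) by one pass over enumerate adding a+i*d at True positions.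
import Mathlib
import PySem

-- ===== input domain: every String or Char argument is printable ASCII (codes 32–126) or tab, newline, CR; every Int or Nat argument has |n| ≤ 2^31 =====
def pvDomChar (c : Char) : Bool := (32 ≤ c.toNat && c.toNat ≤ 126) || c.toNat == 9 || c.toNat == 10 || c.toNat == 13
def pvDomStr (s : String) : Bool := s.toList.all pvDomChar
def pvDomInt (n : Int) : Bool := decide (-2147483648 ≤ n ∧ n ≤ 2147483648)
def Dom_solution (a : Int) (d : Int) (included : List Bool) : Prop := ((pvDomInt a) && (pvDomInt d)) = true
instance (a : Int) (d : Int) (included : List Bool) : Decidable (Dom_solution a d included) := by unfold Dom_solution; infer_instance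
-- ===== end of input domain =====

-- B replaces A's destructive pop(0) while-loop with a single enumerate pass; equivalence is about the RETURN value only (Python A empties the `included` list in place, B does not mutate it).
-- ===== PORT A =====
-- the while loop: state (a, answer); each iteration tests included[0], adds, a += d, pops the head
def solutionGo (d : Int) (a : Int) (answer : Int) : List Bool → Int
  | [] => answer
  | b :: rest => solutionGo d (a + d) (if b = true then answer + a else answer) rest

def solution (a : Int) (d : Int) (included : List Bool) : Int :=
  solutionGo d a 0 included

-- ===== PORT B =====
def solution_alt (a : Int) (d : Int) (included : List Bool) : Int :=
  ((PySem.List.enumerate included).filter (fun p => p.2)).foldl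
    (fun acc p => acc + (a + p.1 * d)) 0

-- ===== PRECONDITION & SPEC =====
def Spec_solution (a : Int) (d : Int) (included : List Bool) (out : Int) : Prop := out = solution_alt a d included
instance (a : Int) (d : Int) (included : List Bool) (out : Int) : Decidable (Spec_solution a d included out) := by unfold Spec_solution; infer_instance

-- ===== CLAIM (what is proved, stated in full; the proofs are below) =====
def Claim_equal_solution : Prop := ∀ (a : Int) (d : Int) (included : List Bool), Dom_solution a d included → Spec_solution a d included (solution a d included)

-- ===== LEMMAS AND PROOFS =====

-- ===== VERDICT (by name: the statement is the Claim_ definition above) =====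
theorem foldl_shift (l : List (Int × Bool)) (f : Int × Bool → Int) (x : Int) :
    l.foldl (fun acc p => acc + f p) x = x + l.foldl (fun acc p => acc + f p) 0 := by
  induction l generalizing x with
  | nil => simp
  | cons q qs ih => simp only [List.foldl_cons]; rw [ih (x + f q), ih (0 + f q)]; ring

theorem solutionGo_eq (d a answer : Int) (l : List Bool) (s : Int) :
    solutionGo d a answer l =
      answer + ((PySem.List.enumerate l s).filter (fun p => p.2)).foldl
        (fun acc p => acc + (a + (p.1 - s) * d)) 0 := by
  induction l generalizing a answer s with
  | nil => simp [solutionGo, PySem.List.enumerate_nil]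
  | cons b rest ih =>
    simp only [solutionGo, PySem.List.enumerate_cons, List.filter_cons]
    rw [ih (a + d) _ (s + 1)]
    have key : ∀ init : Int,
        ((PySem.List.enumerate rest (s+1)).filter (fun p => p.2)).foldl
          (fun acc p => acc + ((a + d) + (p.1 - (s+1)) * d)) init =
        ((PySem.List.enumerate rest (s+1)).filter (fun p => p.2)).foldl
          (fun acc p => acc + (a + (p.1 - s) * d)) init := by
      intro init
      induction (PySem.List.enumerate rest (s+1)).filter (fun p => p.2) generalizing init with
      | nil => rfl
      | cons q qs ihq =>
          simp only [List.foldl_cons]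
          rw [ihq]
          ring_nf
    cases b with
    | false =>
        simp only [Bool.false_eq_true, if_false]
        rw [key]
    | true =>
        simp only [if_true, List.foldl_cons]
        rw [key, foldl_shift _ (fun p => a + (p.1 - s) * d) (0 + (a + (s - s) * d))]
        ring

theorem solution_spec : Claim_equal_solution := by
  intro a d included _
  unfold Spec_solution solution solution_alt
  rw [solutionGo_eq d a 0 included 0]
  simp only [Int.sub_zero, Int.zero_add]
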